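-- pv_equiv track=rewrite | github.com/Iris0222/Poker-24-Point-Game | Poker 24-Point Game.py | addBrackets
-- ===== SOURCE A (Python) =====
-- def addBrackets(new_list):
--     temp = new_list.copy()
--     bracket = []
--     for i in range(5):
--         if i == 0: #1+(2+(3+4))
--             temp.insert(2, '(')
--             temp.insert(5, '(')
--             temp.insert(9, ')')
--             temp.insert(9, ')')
--         elif i == 1: #1+((2+3)+4)
--             temp.insert(2, '(')
--             temp.insert(2, '(')
--             temp.insert(7, ')')
--             temp.insert(10, ')')
--         elif i == 2: #(1+2)+(3+4)
--             temp.insert(0, '(')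
--             temp.insert(4, ')')
--             temp.insert(6, '(')
--             temp.insert(10, ')')
--         elif i == 3: #(1+(2+3))+4
--             temp.insert(0, '(')
--             temp.insert(3, '(')
--             temp.insert(7, ')')
--             temp.insert(8, ')')
--         elif i == 4: #((1+2)+3)+4
--             temp.insert(0, '(')
--             temp.insert(1, '(')
--             temp.insert(5, ')')
--             temp.insert(8, ')')
--
--         str = "".join(temp)
--         bracket.append(str)
--
--         temp.clear()
--         temp = new_list.copy()
--
--     return bracket
-- ===== SOURCE B (Python) =====
-- def addBrackets(new_list):
--     e = new_list
--     return [
--         "".join(e[:2] + ['('] + e[2:4] + ['('] + e[4:7] + [')', ')'] + e[7:]),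
--         "".join(e[:2] + ['(', '('] + e[2:5] + [')'] + e[5:7] + [')'] + e[7:]),
--         "".join(['('] + e[:3] + [')'] + e[3:4] + ['('] + e[4:7] + [')'] + e[7:]),
--         "".join(['('] + e[:2] + ['('] + e[2:5] + [')', ')'] + e[5:7] + e[7:]),
--         "".join(['(', '('] + e[:3] + [')'] + e[3:5] + [')'] + e[5:7] + e[7:]),
--     ]
-- ===== Notes on version B (the rewrite author's own statement) =====
-- stated objective: simpler
-- what changed: Instead of looping over 5 pattern indices and mutating a fresh copy with four position-clamped list.insert calls per pattern, B builds each of the 5 bracketed strings directly as one join of slices of the input interleaved with bracket literals; the loop, the copies and the inserts disappear.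
import Mathlib
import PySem

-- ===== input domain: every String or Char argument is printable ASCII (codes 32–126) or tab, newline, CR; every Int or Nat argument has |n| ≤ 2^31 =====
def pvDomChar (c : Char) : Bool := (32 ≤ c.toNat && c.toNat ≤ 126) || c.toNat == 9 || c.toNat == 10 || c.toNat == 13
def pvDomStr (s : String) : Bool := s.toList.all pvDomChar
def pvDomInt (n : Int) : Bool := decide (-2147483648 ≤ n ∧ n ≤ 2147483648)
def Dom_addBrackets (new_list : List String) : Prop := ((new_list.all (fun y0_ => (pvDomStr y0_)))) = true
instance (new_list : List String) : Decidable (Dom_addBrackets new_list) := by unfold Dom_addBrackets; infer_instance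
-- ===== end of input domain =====

-- B replaces A's loop of insert-mutations by a direct join of slices per pattern (simpler); return values agree on all inputs.

-- ===== PORT A =====
-- literal port of A: for i in range(5), copy the list, do the four inserts of the branch, join, append.
def addBrackets (new_list : List String) : List String :=
  (PySem.List.pyRange 0 5 1).foldl (fun bracket i =>
    let temp :=
      if i == 0 then
        PySem.List.insert (PySem.List.insert (PySem.List.insert (PySem.List.insert new_list 2 "(") 5 "(") 9 ")") 9 ")"
      else if i == 1 then
        PySem.List.insert (PySem.List.insert (PySem.List.insert (PySem.List.insert new_list 2 "(") 2 "(") 7 ")") 10 ")"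
      else if i == 2 then
        PySem.List.insert (PySem.List.insert (PySem.List.insert (PySem.List.insert new_list 0 "(") 4 ")") 6 "(") 10 ")"
      else if i == 3 then
        PySem.List.insert (PySem.List.insert (PySem.List.insert (PySem.List.insert new_list 0 "(") 3 "(") 7 ")") 8 ")"
      else if i == 4 then
        PySem.List.insert (PySem.List.insert (PySem.List.insert (PySem.List.insert new_list 0 "(") 1 "(") 5 ")") 8 ")"
      else new_list
    bracket ++ [PySem.Str.join "" temp]) []

-- ===== PORT B =====
-- literal port of Source B: each string is one join of slices interleaved with bracket literals.
def addBrackets_alt (new_list : List String) : List String :=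
  let e := new_list
  [ PySem.Str.join "" (PySem.List.slice e none (some 2) ++ ["("] ++ PySem.List.slice e (some 2) (some 4) ++ ["("] ++ PySem.List.slice e (some 4) (some 7) ++ [")", ")"] ++ PySem.List.slice e (some 7) none),
    PySem.Str.join "" (PySem.List.slice e none (some 2) ++ ["(", "("] ++ PySem.List.slice e (some 2) (some 5) ++ [")"] ++ PySem.List.slice e (some 5) (some 7) ++ [")"] ++ PySem.List.slice e (some 7) none),
    PySem.Str.join "" (["("] ++ PySem.List.slice e none (some 3) ++ [")"] ++ PySem.List.slice e (some 3) (some 4) ++ ["("] ++ PySem.List.slice e (some 4) (some 7) ++ [")"] ++ PySem.List.slice e (some 7) none),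
    PySem.Str.join "" (["("] ++ PySem.List.slice e none (some 2) ++ ["("] ++ PySem.List.slice e (some 2) (some 5) ++ [")", ")"] ++ PySem.List.slice e (some 5) (some 7) ++ PySem.List.slice e (some 7) none),
    PySem.Str.join "" (["(", "("] ++ PySem.List.slice e none (some 3) ++ [")"] ++ PySem.List.slice e (some 3) (some 5) ++ [")"] ++ PySem.List.slice e (some 5) (some 7) ++ PySem.List.slice e (some 7) none) ]

-- ===== PRECONDITION & SPEC =====
def Spec_addBrackets (new_list : List String) (out : List String) : Prop := out = addBrackets_alt new_list
instance (new_list : List String) (out : List String) : Decidable (Spec_addBrackets new_list out) := by unfold Spec_addBrackets; infer_instance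

-- ===== CLAIM (what is proved, stated in full; the proofs are below) =====
def Claim_equal_addBrackets : Prop := ∀ (new_list : List String), Dom_addBrackets new_list → Spec_addBrackets new_list (addBrackets new_list)

-- ===== LEMMAS AND PROOFS =====
theorem pyRange05 : PySem.List.pyRange 0 5 1 = [0, 1, 2, 3, 4] := by decide

-- Python list.insert clamps a nonnegative position to the length: it is take/drop at i.toNat.
theorem ins_eq {α : Type} (xs : List α) (i : Int) (v : α) (h : 0 ≤ i) :
    PySem.List.insert xs i v = xs.take i.toNat ++ v :: xs.drop i.toNat := by
  simp [PySem.List.insert, PySem.List.sliceIndices]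
  rw [if_neg (by omega)]
  have hm : (min i (xs.length : Int)).toNat = min i.toNat xs.length := by omega
  rw [hm]
  rcases le_total i.toNat xs.length with h2 | h2
  · rw [min_eq_left h2]
  · rw [min_eq_right h2, List.take_of_length_le h2, List.take_of_length_le le_rfl,
        List.drop_of_length_le h2, List.drop_of_length_le le_rfl]

-- ===== VERDICT (by name: the statement is the Claim_ definition above) =====
theorem addBrackets_spec : Claim_equal_addBrackets := by
  intro l _
  unfold Spec_addBrackets addBrackets addBrackets_alt
  rw [pyRange05]
  rcases l with _ | ⟨a, _ | ⟨b, _ | ⟨c, _ | ⟨d, _ | ⟨e, _ | ⟨f, _ | ⟨g, rest⟩⟩⟩⟩⟩⟩⟩ <;>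
    simp [ins_eq, PySem.List.slice, List.foldl,
      PySem.Str.join, PySem.Chars.join]
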